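-- pv_equiv track=rewrite | github.com/BoudewijnKlijn/competitive_programming | leetcode/leetcode_1937.py | adjust_row_values
-- ===== SOURCE A (Python) =====
-- from typing import List
--
-- def adjust_row_values(points: List[List[int]]) -> int:
--     """Adjust row values before the double inner loop.
--     Say we have a 3 rows: [4,0,4], then [1,5,1] and then [4,0,0].
--     We can adjust the values to reflect the switching columns.
--     Rows becomes, [4, 3, 4] then [4,5,4] and [4,3,2].
--     Then the sum per column and then the max.
--     Wrong answer: thinking error."""
--     R = len(points)
--     C = len(points[0])
--     adjusted_rows = [points[0]]
--     for r in range(1, R):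
--         adjusted_column = []
--         # penalty should be two, because forth and back. except for the last row
--         penalty = 1 if r == R - 1 else 2
--         # initialization to use the same loop for all columns
--         prev_col_max = points[r][0] + penalty
--         for c in range(C):
--             prev_col_max = max(
--                 prev_col_max - penalty,
--                 *(val - i * penalty for i, val in enumerate(points[r][c:]))
--             )
--             adjusted_column.append(prev_col_max)
--         adjusted_rows.append(adjusted_column)
--         # TODO: make faster with pointers moving out from the max. faster than two nested loops.
--
--     return max(map(sum, zip(*adjusted_rows)))
-- ===== SOURCE B (Python) =====
-- from typing import List
--
-- def adjust_row_values(points: List[List[int]]) -> int: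
--     """O(R*C): per row, precompute suffix maxima of points[r][k] - k*penalty,
--     then one forward pass; accumulate column sums on the fly."""
--     R = len(points)
--     total = list(points[0])  # C = len(total)
--     for r in range(1, R):
--         row = points[r]
--         penalty = 1 if r == R - 1 else 2
--         # suffix maxima of row[k] - k*penalty
--         suff = []
--         best = None
--         for k in reversed(range(len(row))):
--             v = row[k] - k * penalty
--             best = v if best is None or v > best else best
--             suff.append(best)
--         suff.reverse()
--         prev = row[0] + penalty
--         for c in range(len(total)):
--             prev -= penalty
--             cand = suff[c] + c * penalty
--             if cand > prev:
--                 prev = cand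
--             total[c] += prev
--     return max(total)
-- ===== Notes on version B (the rewrite author's own statement) =====
-- stated objective: faster
-- what changed: replaces A's per-column rescan of the row suffix by a precomputed suffix-max array of points[r][k]-k*penalty and a single forward pass per row, accumulating column sums in place instead of building all adjusted rows and transposing
import Mathlib
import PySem

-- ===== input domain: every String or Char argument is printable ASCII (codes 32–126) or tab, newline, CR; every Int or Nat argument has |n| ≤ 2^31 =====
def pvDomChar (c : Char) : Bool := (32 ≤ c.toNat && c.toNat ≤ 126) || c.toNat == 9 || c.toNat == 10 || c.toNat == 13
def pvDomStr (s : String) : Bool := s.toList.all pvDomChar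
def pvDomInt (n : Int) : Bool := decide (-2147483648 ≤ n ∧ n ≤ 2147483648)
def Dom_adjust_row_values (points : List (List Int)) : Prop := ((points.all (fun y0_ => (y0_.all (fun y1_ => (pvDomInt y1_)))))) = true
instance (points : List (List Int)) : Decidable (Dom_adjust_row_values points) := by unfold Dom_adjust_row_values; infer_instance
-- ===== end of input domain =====

-- B replaces A's per-column rescans of the row suffix by one precomputed suffix-max
-- array per row and a single forward pass accumulating column sums (measured faster,
-- asymptotically: O(R*C) instead of O(R*C^2)).

-- ===== PORT A =====
-- max(prev - pen, *(val - i*pen for i, val in enumerate(tail)))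
def pvInnerA (pen : Int) (tail : List Int) (prev : Int) : Int :=
  ((PySem.List.enumerate tail 0).map (fun p => p.2 - p.1 * pen)).foldl max (prev - pen)

-- the inner 'for c in range(C)' loop building adjusted_column
def pvAdjCol (row : List Int) (pen : Int) (C : Nat) : List Int :=
  ((List.range C).foldl
    (fun (st : Int × List Int) (c : Nat) =>
      let p := pvInnerA pen (PySem.List.slice row (some (c : Int)) none) st.1
      (p, st.2 ++ [p]))
    (PySem.List.pyGetD row 0 0 + pen, [])).2
def adjust_row_values (points : List (List Int)) : Int :=
  let R : Int := points.length
  let row0 := PySem.List.pyGetD points 0 []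
  let C := row0.length
  let adjusted_rows := row0 :: (PySem.List.pyRange 1 R 1).map (fun r =>
    let pen : Int := if r = R - 1 then 1 else 2
    pvAdjCol (PySem.List.pyGetD points r []) pen C)
  let n := (adjusted_rows.map List.length).foldl min C
  let sums := (List.range n).map (fun (c : Nat) =>
    (adjusted_rows.map (fun row => PySem.List.pyGetD row (c : Int) 0)).sum)
  (PySem.List.max? sums (fun x => x)).getD 0

-- ===== PORT B =====
-- suffix maxima of row[k] - k*pen (Source B builds them back to front with a reversed loop)
def pvSuffix (pen : Int) : Nat → List Int → List Int
  | _, [] => []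
  | k, v :: rest =>
    match pvSuffix pen (k+1) rest with
    | [] => [v - (k : Int) * pen]
    | m :: t => max (v - (k : Int) * pen) m :: m :: t

-- one row of B: single forward pass updating total in place
def pvAddRow (row : List Int) (pen : Int) (total : List Int) : List Int :=
  let suff := pvSuffix pen 0 row
  ((List.range total.length).foldl
    (fun (st : Int × List Int) (c : Nat) =>
      let p := st.1 - pen
      let cand := suff.getD c 0 + (c : Int) * pen
      let p := if cand > p then cand else p
      (p, st.2.set c (st.2.getD c 0 + p)))
    (PySem.List.pyGetD row 0 0 + pen, total)).2
def adjust_row_values_alt (points : List (List Int)) : Int :=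
  let R : Int := points.length
  let total := (PySem.List.pyRange 1 R 1).foldl
    (fun total r =>
      let pen : Int := if r = R - 1 then 1 else 2
      pvAddRow (PySem.List.pyGetD points r []) pen total)
    (PySem.List.pyGetD points 0 [])
  (PySem.List.max? total (fun x => x)).getD 0

-- ===== PRECONDITION & SPEC =====
-- Pre_ excludes exactly the inputs where Python A raises: an empty points (IndexError
-- on points[0]), an empty first row (ValueError: max() of the empty zip), and a later
-- row shorter than row 0 (TypeError: max(x, *empty_generator)).
def Pre_adjust_row_values (points : List (List Int)) : Prop :=
  points ≠ [] ∧ points.getD 0 [] ≠ [] ∧ ∀ row ∈ points, (points.getD 0 []).length ≤ row.length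
instance (points : List (List Int)) : Decidable (Pre_adjust_row_values points) := by
  unfold Pre_adjust_row_values; infer_instance
def pvWitness_adjust_row_values : List (List Int) := [[4,0,4],[1,5,1],[4,0,0]]

def Spec_adjust_row_values (points : List (List Int)) (out : Int) : Prop := out = adjust_row_values_alt points
instance (points : List (List Int)) (out : Int) : Decidable (Spec_adjust_row_values points out) := by unfold Spec_adjust_row_values; infer_instance

-- ===== CLAIM (what is proved, stated in full; the proofs are below) =====
def Claim_equal_adjust_row_values : Prop := ∀ (points : List (List Int)), Dom_adjust_row_values points → Pre_adjust_row_values points → Spec_adjust_row_values points (adjust_row_values points)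

-- ===== LEMMAS AND PROOFS =====

-- the common per-step prev update (B's step; A's inner max equals it: pvStepEq)
def pvStep (row : List Int) (pen p : Int) (c : Nat) : Int :=
  let q := p - pen
  let cand := (pvSuffix pen 0 row).getD c 0 + (c : Int) * pen
  if cand > q then cand else q

-- prev after c steps of the forward pass
def pvPrev (row : List Int) (pen : Int) : Nat → Int
  | 0 => PySem.List.pyGetD row 0 0 + pen
  | c + 1 => pvStep row pen (pvPrev row pen c) c
theorem pvSuffix_length (pen : Int) (k : Nat) (xs : List Int) :
    (pvSuffix pen k xs).length = xs.length := by
  induction xs generalizing k with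
  | nil => simp [pvSuffix]
  | cons v rest ih =>
    have hl := ih (k+1)
    simp only [pvSuffix]
    cases h : pvSuffix pen (k+1) rest with
    | nil => rw [h] at hl; simp only [List.length_nil] at hl; simp [← hl]
    | cons m t => rw [h] at hl; simpa using hl
theorem pvSuffix_tail (pen : Int) (k : Nat) (v : Int) (rest : List Int) :
    (pvSuffix pen k (v :: rest)).tail = pvSuffix pen (k+1) rest := by
  simp only [pvSuffix]
  cases h : pvSuffix pen (k+1) rest <;> simp
theorem pvSuffix_succ (pen : Int) (k : Nat) (xs : List Int) :
    pvSuffix pen (k+1) xs = (pvSuffix pen k xs).map (fun x => x - pen) := by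
  induction xs generalizing k with
  | nil => simp [pvSuffix]
  | cons v rest ih =>
    simp only [pvSuffix, ih (k+1)]
    cases h : pvSuffix pen (k+1) rest with
    | nil => simp; push_cast; ring
    | cons m t =>
      simp only [List.map_cons, List.map]
      rw [show v - ((k:Nat)+1 : Nat) * pen = (v - (k:Int)*pen) - pen from by push_cast; ring,
        max_sub_sub_right]
theorem pvSuffix_shift (pen : Int) (k : Nat) (xs : List Int) :
    pvSuffix pen k xs = (pvSuffix pen 0 xs).map (fun x => x - (k : Int) * pen) := by
  induction k with
  | zero => simp
  | succ k ih =>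
    rw [pvSuffix_succ, ih, List.map_map]
    apply List.map_congr_left
    intro x _
    simp only [Function.comp]
    push_cast; ring
theorem pvSuffix_drop (pen : Int) (k c : Nat) (xs : List Int) :
    (pvSuffix pen k xs).drop c = pvSuffix pen (k + c) (xs.drop c) := by
  induction c generalizing k xs with
  | zero => simp
  | succ c ih =>
    cases xs with
    | nil => simp [pvSuffix]
    | cons v rest =>
      have h1 : (pvSuffix pen k (v :: rest)).drop (c+1)
          = ((pvSuffix pen k (v :: rest)).tail).drop c := by
        rw [Nat.add_comm, ← List.drop_drop, List.drop_one]
      rw [h1, pvSuffix_tail, ih, List.drop_succ_cons]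
      congr 1
      omega
theorem pvFoldMax_enum (pen : Int) (xs : List Int) (k : Nat) (a : Int) :
    ((PySem.List.enumerate xs (k : Int)).map (fun p => p.2 - p.1 * pen)).foldl max a
      = match pvSuffix pen k xs with
        | [] => a
        | m :: _ => max a m := by
  induction xs generalizing k a with
  | nil => simp [pvSuffix, PySem.List.enumerate_nil]
  | cons v rest ih =>
    rw [PySem.List.enumerate_cons]
    simp only [List.map_cons, List.foldl_cons]
    have : ((k : Int) + 1) = ((k + 1 : Nat) : Int) := by push_cast; ring
    rw [this, ih (k+1) (max a (v - (k:Int) * pen))]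
    simp only [pvSuffix]
    cases h : pvSuffix pen (k+1) rest with
    | nil => simp
    | cons m t => simp [max_assoc]
theorem pvStepEq (row : List Int) (pen : Int) (c : Nat) (p : Int) (hc : c < row.length) :
    pvInnerA pen (PySem.List.slice row (some (c : Int)) none) p = pvStep row pen p c := by
  unfold pvInnerA pvStep
  rw [PySem.List.slice_from_natCast]
  obtain ⟨m, t, hmt⟩ : ∃ m t, pvSuffix pen 0 (row.drop c) = m :: t := by
    cases h : pvSuffix pen 0 (row.drop c) with
    | nil =>
      have := pvSuffix_length pen 0 (row.drop c)
      rw [h] at this; simp at this; omega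
    | cons m t => exact ⟨m, t, rfl⟩
  have hgetD : (pvSuffix pen 0 row).getD c 0 = m - (c : Int) * pen := by
    have hd : (pvSuffix pen 0 row).drop c = (pvSuffix pen 0 (row.drop c)).map (fun x => x - (c:Int)*pen) := by
      rw [pvSuffix_drop, Nat.zero_add, pvSuffix_shift]
    have : (pvSuffix pen 0 row).getD c 0 = ((pvSuffix pen 0 row).drop c).getD 0 0 := by
      simp [List.getD, List.getElem?_drop]
    rw [this, hd, hmt]
    simp
  have hfold := pvFoldMax_enum pen (row.drop c) 0 (p - pen)
  rw [Nat.cast_zero] at hfold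
  rw [hfold, hmt, hgetD]
  have : m - (c:Int)*pen + (c:Int)*pen = m := by ring
  rw [this]
  change max (p - pen) m = if m > p - pen then m else p - pen
  rw [max_def]
  split_ifs <;> omega
theorem pvAdjCol_fold (row : List Int) (pen : Int) (C : Nat) (hC : C ≤ row.length) :
    (List.range C).foldl
      (fun (st : Int × List Int) (c : Nat) =>
        let p := pvInnerA pen (PySem.List.slice row (some (c : Int)) none) st.1
        (p, st.2 ++ [p]))
      (PySem.List.pyGetD row 0 0 + pen, [])
    = (pvPrev row pen C, (List.range C).map (fun c => pvPrev row pen (c+1))) := by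
  induction C with
  | zero => simp [pvPrev]
  | succ C ih =>
    rw [List.range_succ, List.foldl_append, ih (by omega)]
    simp only [List.foldl_cons, List.foldl_nil]
    rw [pvStepEq row pen C _ (by omega)]
    simp [pvPrev, List.range_succ]
theorem pvAdjCol_eq (row : List Int) (pen : Int) (C : Nat) (hC : C ≤ row.length) :
    pvAdjCol row pen C = (List.range C).map (fun c => pvPrev row pen (c+1)) := by
  unfold pvAdjCol
  rw [pvAdjCol_fold row pen C hC]
theorem pvAdjCol_length (row : List Int) (pen : Int) (C : Nat) (hC : C ≤ row.length) :
    (pvAdjCol row pen C).length = C := by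
  rw [pvAdjCol_eq row pen C hC]; simp
theorem pvAddRow_fold (row : List Int) (pen : Int) (total : List Int) (C : Nat)
    (hC : C ≤ total.length) :
    (List.range C).foldl
      (fun (st : Int × List Int) (c : Nat) =>
        let p := st.1 - pen
        let cand := (pvSuffix pen 0 row).getD c 0 + (c : Int) * pen
        let p := if cand > p then cand else p
        (p, st.2.set c (st.2.getD c 0 + p)))
      (PySem.List.pyGetD row 0 0 + pen, total)
    = (pvPrev row pen C,
       List.zipWith (· + ·) (total.take C) ((List.range C).map (fun c => pvPrev row pen (c+1)))
         ++ total.drop C) := by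
  induction C with
  | zero => simp [pvPrev]
  | succ C ih =>
    rw [List.range_succ, List.foldl_append, ih (by omega)]
    simp only [List.foldl_cons, List.foldl_nil]
    have hClt : C < total.length := by omega
    have hfst : (if (pvSuffix pen 0 row).getD C 0 + (C : Int) * pen > pvPrev row pen C - pen
        then (pvSuffix pen 0 row).getD C 0 + (C : Int) * pen
        else pvPrev row pen C - pen) = pvPrev row pen (C+1) := by
      simp [pvPrev, pvStep]
    have hlen : (List.zipWith (· + ·) (total.take C)
        ((List.range C).map (fun c => pvPrev row pen (c+1)))).length = C := by
      simp [Nat.min_def]; omega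
    have hT : (List.zipWith (· + ·) (total.take C)
          ((List.range C).map (fun c => pvPrev row pen (c+1))) ++ total.drop C).getD C 0
        = total[C] := by
      simp [List.getD, List.getElem?_append_right, hlen, List.getElem?_drop,
        List.getElem?_eq_getElem hClt]
    refine Prod.ext ?_ ?_
    · simpa using hfst
    · simp only []
      rw [hfst, hT]
      rw [List.set_append_right _ _ (by omega), hlen, Nat.sub_self]
      rw [List.drop_eq_getElem_cons hClt, List.set_cons_zero]
      rw [List.take_succ, List.getElem?_eq_getElem hClt]
      simp only [Option.toList_some]
      rw [List.map_append]
      rw [List.zipWith_append (by simp [Nat.min_def]; omega)]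
      simp
theorem pvAddRow_eq (row : List Int) (pen : Int) (total : List Int)
    (h : total.length ≤ row.length) :
    pvAddRow row pen total = List.zipWith (· + ·) total (pvAdjCol row pen total.length) := by
  have hf := congrArg Prod.snd (pvAddRow_fold row pen total total.length (le_refl _))
  simp only [] at hf
  unfold pvAddRow
  show ((List.range total.length).foldl
      (fun (st : Int × List Int) (c : Nat) =>
        let p := st.1 - pen
        let cand := (pvSuffix pen 0 row).getD c 0 + (c : Int) * pen
        let p := if cand > p then cand else p
        (p, st.2.set c (st.2.getD c 0 + p)))
      (PySem.List.pyGetD row 0 0 + pen, total)).2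
    = List.zipWith (· + ·) total (pvAdjCol row pen total.length)
  rw [hf, pvAdjCol_eq row pen total.length h]
  simp
theorem pvAddRow_length (row : List Int) (pen : Int) (total : List Int)
    (h : total.length ≤ row.length) :
    (pvAddRow row pen total).length = total.length := by
  rw [pvAddRow_eq row pen total h]
  simp [Nat.min_def, pvAdjCol_length row pen total.length h]
theorem pvZipFold (ls : List (List Int)) (t : List Int)
    (h : ∀ l ∈ ls, l.length = t.length) :
    ls.foldl (fun acc l => List.zipWith (· + ·) acc l) t
      = (List.range t.length).map
          (fun c => t.getD c 0 + (ls.map (fun l => l.getD c 0)).sum) := by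
  induction ls generalizing t with
  | nil =>
    apply List.ext_getElem (by simp)
    intro c h1 h2
    have h1' : c < t.length := by simpa using h1
    simp [List.getD, List.getElem?_eq_getElem h1']
  | cons l ls ih =>
    simp only [List.foldl_cons]
    have hlen : (List.zipWith (· + ·) t l).length = t.length := by
      have := h l (by simp)
      simp [Nat.min_def, this]
    rw [ih _ (fun l' hl' => by rw [hlen]; exact h l' (by simp [hl'])), hlen]
    apply List.map_congr_left
    intro c hc
    simp only [List.mem_range] at hc
    have hcl : c < l.length := by rw [h l (by simp)]; exact hc
    have : (List.zipWith (· + ·) t l).getD c 0 = t.getD c 0 + l.getD c 0 := by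
      simp [List.getD, List.getElem?_eq_getElem, hc, hcl, List.getElem?_zipWith,
        List.getElem?_eq_getElem (show c < t.length from hc)]
    rw [this]
    simp [add_assoc]
theorem pvFoldRows (rs : List Int) (row_ : Int → List Int) (pen_ : Int → Int)
    (t : List Int) (h : ∀ r ∈ rs, t.length ≤ (row_ r).length) :
    rs.foldl (fun t r => pvAddRow (row_ r) (pen_ r) t) t
      = (rs.map (fun r => pvAdjCol (row_ r) (pen_ r) t.length)).foldl
          (fun acc l => List.zipWith (· + ·) acc l) t := by
  induction rs generalizing t with
  | nil => simp
  | cons r rs ih =>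
    simp only [List.foldl_cons, List.map_cons]
    have hr : t.length ≤ (row_ r).length := h r (by simp)
    rw [← pvAddRow_eq _ _ _ hr]
    have hlen := pvAddRow_length (row_ r) (pen_ r) t hr
    rw [ih _ (fun r' hr' => by rw [hlen]; exact h r' (by simp [hr']))]
    rw [hlen]
theorem pvFoldMin (l : List Nat) (C : Nat) (h : ∀ x ∈ l, x = C) :
    l.foldl min C = C := by
  induction l with
  | nil => rfl
  | cons x xs ih =>
    rw [List.foldl_cons, h x (by simp), min_self]
    exact ih (fun x hx => h x (by simp [hx]))
theorem pvMain (points : List (List Int))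
    (h3 : ∀ row ∈ points, (points.getD 0 []).length ≤ row.length) :
    adjust_row_values points = adjust_row_values_alt points := by
  have hrow0 : PySem.List.pyGetD points 0 ([] : List Int) = points.getD 0 [] :=
    PySem.List.pyGetD_zero points []
  have hmem : ∀ r ∈ PySem.List.pyRange 1 (points.length : Int) 1,
      (points.getD 0 []).length ≤ (PySem.List.pyGetD points r ([] : List Int)).length := by
    intro r hr
    rw [PySem.List.mem_pyRange_one] at hr
    refine h3 _ (PySem.List.pyGetD_mem points [] ⟨by omega, hr.2⟩)
  have hlsC : ∀ l ∈ (PySem.List.pyRange 1 (points.length : Int) 1).map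
      (fun r => pvAdjCol (PySem.List.pyGetD points r []) (if r = (points.length : Int) - 1 then 1 else 2) (points.getD 0 []).length),
      l.length = (points.getD 0 []).length := by
    intro l hl
    simp only [List.mem_map] at hl
    obtain ⟨r, hr, rfl⟩ := hl
    exact pvAdjCol_length _ _ _ (hmem r hr)
  simp only [adjust_row_values, adjust_row_values_alt, hrow0]
  rw [pvFoldRows _ (fun r => PySem.List.pyGetD points r [])
      (fun r => if r = (points.length : Int) - 1 then 1 else 2) _ hmem]
  rw [pvZipFold _ _ hlsC]
  rw [pvFoldMin _ _ (by
    intro x hx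
    simp only [List.map_cons, List.mem_cons, List.mem_map] at hx
    rcases hx with rfl | hx
    · rfl
    · obtain ⟨l, hl, rfl⟩ := hx
      obtain ⟨r, hr, rfl⟩ := hl
      exact pvAdjCol_length _ _ _ (hmem r hr))]
  congr 2
  apply List.map_congr_left
  intro c hc
  simp only [List.map_cons, List.sum_cons, PySem.List.pyGetD_natCast, List.map_map]
-- ===== VERDICT (by name: the statement is the Claim_ definition above) =====
theorem adjust_row_values_spec : Claim_equal_adjust_row_values := by
  intro points _ hpre
  unfold Spec_adjust_row_values
  exact pvMain points hpre.2.2
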